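-- pv_equiv track=rewrite | github.com/andreason21/oxenClaw | sampyclaw/clawhub/runtime.py | _expand_env_value
-- ===== SOURCE A (Python) =====
-- from typing import Any
--
-- def _expand_env_value(value: Any, host_env: dict[str, str]) -> str:
--     """Resolve `$VAR` references against `host_env`, leaving unknown
--     references as empty strings (mirrors POSIX shell expansion of unset
--     vars). Non-string values are coerced via str()."""
--     if not isinstance(value, str):
--         return str(value)
--     if "$" not in value:
--         return value
--     out: list[str] = []
--     i = 0
--     while i < len(value):
--         ch = value[i]
--         if ch != "$":
--             out.append(ch)
--             i += 1
--             continue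
--         # Bare `$`. Read until non-identifier char.
--         j = i + 1
--         # Allow ${VAR} braced form.
--         if j < len(value) and value[j] == "{":
--             end = value.find("}", j + 1)
--             if end == -1:
--                 out.append(ch)
--                 i += 1
--                 continue
--             name = value[j + 1 : end]
--             out.append(host_env.get(name, ""))
--             i = end + 1
--             continue
--         while j < len(value) and (value[j].isalnum() or value[j] == "_"):
--             j += 1
--         name = value[i + 1 : j]
--         if not name:
--             out.append("$")
--             i += 1
--             continue
--         out.append(host_env.get(name, ""))
--         i = j
--     return "".join(out)
-- ===== SOURCE B (Python) =====
-- def _expand_env_value(value, host_env):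
--     """Resolve `$VAR` / `${VAR}` references against `host_env`; unknown names
--     expand to "". Chunk-based: jump from '$' to '$' with str.partition instead
--     of copying character by character."""
--     if not isinstance(value, str):
--         return str(value)
--     if "$" not in value:
--         return value
--     parts = []
--     s = value
--     while True:
--         head, dollar, rest = s.partition("$")
--         parts.append(head)
--         if not dollar:
--             break
--         if rest.startswith("{"):
--             name, brace, tail = rest[1:].partition("}")
--             if brace:
--                 parts.append(host_env.get(name, ""))
--                 s = tail
--             else:
--                 parts.append("$")
--                 s = rest
--         else:
--             k = 0
--             n = len(rest)
--             while k < n and (rest[k].isalnum() or rest[k] == "_"):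
--                 k += 1
--             if k == 0:
--                 parts.append("$")
--                 s = rest
--             else:
--                 parts.append(host_env.get(rest[:k], ""))
--                 s = rest[k:]
--     return "".join(parts)
-- ===== Notes on version B (the rewrite author's own statement) =====
-- stated objective: alternative
-- what changed: Replaced the per-character index while-loop with a chunk-based scanner that jumps from '$' to '$' via str.partition, emitting whole literal chunks at once.
import Mathlib
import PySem

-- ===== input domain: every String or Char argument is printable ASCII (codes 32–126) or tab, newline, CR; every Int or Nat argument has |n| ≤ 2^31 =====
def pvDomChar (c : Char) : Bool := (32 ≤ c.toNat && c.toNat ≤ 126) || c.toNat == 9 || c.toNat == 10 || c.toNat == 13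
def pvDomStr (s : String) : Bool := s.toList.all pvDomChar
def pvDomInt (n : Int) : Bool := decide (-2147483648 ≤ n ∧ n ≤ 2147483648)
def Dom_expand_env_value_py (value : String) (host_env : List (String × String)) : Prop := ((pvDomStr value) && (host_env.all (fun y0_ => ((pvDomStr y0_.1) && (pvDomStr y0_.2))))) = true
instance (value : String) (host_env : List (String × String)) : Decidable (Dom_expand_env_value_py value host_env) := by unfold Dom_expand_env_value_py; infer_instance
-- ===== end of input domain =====

-- B replaces A's per-character index while-loop by a chunk scanner that jumps
-- from '$' to '$' (Python str.partition); same return value, no speed claim.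
-- Both loops are totalized with a fuel argument that provably never runs out.
-- (The Lean argument type String makes A's non-str branch unreachable.)

-- shared helpers: dict.get(name, "") on the association list, and the
-- identifier-character test `c.isalnum() or c == "_"` both Pythons use
def envGet (host_env : List (String × String)) (name : String) : String :=
  match host_env.find? (fun p => p.1 == name) with
  | some p => p.2
  | none => ""

def isWordChar (c : Char) : Bool := PySem.Chars.isalnum c || c == '_'

-- ===== PORT A =====
-- inner `while j < len(value) and (value[j].isalnum() or value[j] == "_")`;
-- fuel-totalized (called with fuel = s.length, enough since j only grows)
def wordEnd (s : List Char) : Nat → Nat → Nat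
  | 0, j => j
  | fuel + 1, j =>
    if h : j < s.length then
      if isWordChar (s[j]'h) then wordEnd s fuel (j + 1) else j
    else j

-- `value.find("}", j + 1)`: index of the first '}' at or after position t (none = -1)
def braceEnd (s : List Char) (t : Nat) : Option Nat :=
  ((s.drop t).findIdx? (· == '}')).map (fun k => t + k)

-- the main `while i < len(value)` loop; `out` is the list of appended strings;
-- fuel-totalized (called with fuel = s.length + 1; i strictly grows each step)
def loopA (s : List Char) (host_env : List (String × String)) :
    Nat → Nat → List (List Char) → List (List Char)
  | 0, _, out => out
  | fuel + 1, i, out =>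
    if h : i < s.length then
      if s[i]'h ≠ '$' then
        loopA s host_env fuel (i + 1) (out ++ [[s[i]'h]])
      else
        -- `j = i + 1`; braced `${VAR}` form first
        if s[i + 1]? = some '{' then
          match braceEnd s (i + 2) with
          | none => loopA s host_env fuel (i + 1) (out ++ [[s[i]'h]])
          | some e =>
            loopA s host_env fuel (e + 1)
              (out ++ [(envGet host_env (String.ofList ((s.drop (i + 2)).take (e - (i + 2))))).toList])
        else
          if (s.drop (i + 1)).take (wordEnd s s.length (i + 1) - (i + 1)) = [] then
            loopA s host_env fuel (i + 1) (out ++ [['$']])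
          else
            loopA s host_env fuel (wordEnd s s.length (i + 1))
              (out ++ [(envGet host_env
                (String.ofList ((s.drop (i + 1)).take (wordEnd s s.length (i + 1) - (i + 1))))).toList])
    else out

def expand_env_value_py (value : String) (host_env : List (String × String)) : String :=
  if value.toList.contains '$' = false then value
  else String.ofList (loopA value.toList host_env (value.toList.length + 1) 0 []).flatten

-- ===== PORT B =====
-- `head, dollar, rest = s.partition("$")` → takeWhile/dropWhile + tail; one
-- loop iteration per recursive call; fuel-totalized (fuel = s.length + 1 is
-- enough: every continuation drops at least the matched '$')
def expandB (host_env : List (String × String)) : Nat → List Char → List Char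
  | 0, _ => []
  | fuel + 1, s =>
    let head := s.takeWhile (· ≠ '$')
    let rest0 := s.dropWhile (· ≠ '$')
    if rest0 = [] then head
    else
      let rest := rest0.tail
      if rest.head? = some '{' then
        let rest1 := rest.tail
        let name := rest1.takeWhile (· ≠ '}')
        let rest2 := rest1.dropWhile (· ≠ '}')
        if rest2 ≠ [] then
          head ++ (envGet host_env (String.ofList name)).toList ++ expandB host_env fuel rest2.tail
        else
          head ++ ['$'] ++ expandB host_env fuel rest
      else
        let name := rest.takeWhile isWordChar
        if name = [] then
          head ++ ['$'] ++ expandB host_env fuel rest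
        else
          head ++ (envGet host_env (String.ofList name)).toList
            ++ expandB host_env fuel (rest.drop name.length)

def expand_env_value_py_alt (value : String) (host_env : List (String × String)) : String :=
  if value.toList.contains '$' = false then value
  else String.ofList (expandB host_env (value.toList.length + 1) value.toList)

-- ===== PRECONDITION & SPEC =====
def Spec_expand_env_value_py (value : String) (host_env : List (String × String)) (out : String) : Prop := out = expand_env_value_py_alt value host_env
instance (value : String) (host_env : List (String × String)) (out : String) : Decidable (Spec_expand_env_value_py value host_env out) := by unfold Spec_expand_env_value_py; infer_instance

-- ===== CLAIM (what is proved, stated in full; the proofs are below) =====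
def Claim_equal_expand_env_value_py : Prop := ∀ (value : String) (host_env : List (String × String)), Dom_expand_env_value_py value host_env → Spec_expand_env_value_py value host_env (expand_env_value_py value host_env)

-- ===== LEMMAS AND PROOFS =====

theorem len_pos_of_ne_nil {α : Type} {l : List α} (h : l ≠ []) : 0 < l.length := by
  cases l with
  | nil => exact absurd rfl h
  | cons a l => simp

theorem expandB_nil (host_env : List (String × String)) (f : Nat) :
    expandB host_env (f + 1) [] = [] := by
  simp [expandB]

-- the result does not depend on the fuel once it exceeds the string length
theorem expandB_congr (host_env : List (String × String)) :
    ∀ (f : Nat) (s : List Char) (f' : Nat), s.length < f → s.length < f' →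
      expandB host_env f s = expandB host_env f' s := by
  intro f
  induction f with
  | zero => intro s f' h _; exact absurd h (Nat.not_lt_zero _)
  | succ f ihf =>
    intro s f' h h'
    cases f' with
    | zero => exact absurd h' (Nat.not_lt_zero _)
    | succ f'' =>
      simp only [expandB]
      by_cases h0 : s.dropWhile (fun x => decide (x ≠ '$')) = []
      · rw [if_pos h0, if_pos h0]
      · rw [if_neg h0, if_neg h0]
        have hl1 : (s.dropWhile (fun x => decide (x ≠ '$'))).length ≤ s.length :=
          List.length_dropWhile_le ..
        have hl2 : 0 < (s.dropWhile (fun x => decide (x ≠ '$'))).length :=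
          len_pos_of_ne_nil h0
        by_cases h1 : (s.dropWhile (fun x => decide (x ≠ '$'))).tail.head? = some '{'
        · rw [if_pos h1, if_pos h1]
          by_cases h2 : (s.dropWhile (fun x => decide (x ≠ '$'))).tail.tail.dropWhile
              (fun x => decide (x ≠ '}')) ≠ []
          · rw [if_pos h2, if_pos h2]
            have hb1 : ((s.dropWhile (fun x => decide (x ≠ '$'))).tail.tail.dropWhile
                (fun x => decide (x ≠ '}'))).length
                ≤ (s.dropWhile (fun x => decide (x ≠ '$'))).tail.tail.length :=
              List.length_dropWhile_le ..
            rw [ihf _ f''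
              (by simp only [List.length_tail] at hb1 ⊢; omega)
              (by simp only [List.length_tail] at hb1 ⊢; omega)]
          · rw [if_neg h2, if_neg h2]
            rw [ihf _ f''
              (by simp only [List.length_tail]; omega)
              (by simp only [List.length_tail]; omega)]
        · rw [if_neg h1, if_neg h1]
          by_cases h3 : (s.dropWhile (fun x => decide (x ≠ '$'))).tail.takeWhile isWordChar = []
          · rw [if_pos h3, if_pos h3]
            rw [ihf _ f''
              (by simp only [List.length_tail]; omega)
              (by simp only [List.length_tail]; omega)]
          · rw [if_neg h3, if_neg h3]
            rw [ihf _ f''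
              (by simp only [List.length_drop, List.length_tail]; omega)
              (by simp only [List.length_drop, List.length_tail]; omega)]

theorem expandB_cons_ne (c : Char) (t : List Char) (host_env : List (String × String))
    (f : Nat) (hc : ¬ c = '$') :
    expandB host_env (f + 1) (c :: t) = c :: expandB host_env (f + 1) t := by
  have hc' : (decide (c ≠ '$')) = true := by simp [hc]
  simp only [expandB]
  rw [List.takeWhile_cons, if_pos hc', List.dropWhile_cons, if_pos hc']
  cases hdt : t.dropWhile (fun x => decide (x ≠ '$')) with
  | nil => try simp only [hdt]
           simp
  | cons d r =>
    try simp only [hdt]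
    try simp [List.cons_append]
    split_ifs <;> simp

theorem expandB_dollar (t : List Char) (host_env : List (String × String)) (f : Nat) :
    expandB host_env (f + 1) ('$' :: t) =
      if t.head? = some '{' then
        (if t.tail.dropWhile (fun x => decide (x ≠ '}')) ≠ [] then
          (envGet host_env (String.ofList (t.tail.takeWhile (fun x => decide (x ≠ '}'))))).toList
            ++ expandB host_env f (t.tail.dropWhile (fun x => decide (x ≠ '}'))).tail
         else '$' :: expandB host_env f t)
      else if t.takeWhile isWordChar = [] then '$' :: expandB host_env f t
      else (envGet host_env (String.ofList (t.takeWhile isWordChar))).toList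
             ++ expandB host_env f (t.drop (t.takeWhile isWordChar).length) := by
  simp [expandB, List.takeWhile_cons, List.dropWhile_cons]

theorem find_spec (c : Char) (l : List Char) :
    (l.findIdx? (· == c) = none → l.dropWhile (fun x => decide (x ≠ c)) = []) ∧
    (∀ k, l.findIdx? (· == c) = some k →
      l.takeWhile (fun x => decide (x ≠ c)) = l.take k ∧
      l.dropWhile (fun x => decide (x ≠ c)) = c :: l.drop (k + 1)) := by
  induction l with
  | nil => simp
  | cons a l ih =>
    by_cases ha : a = c
    · subst ha
      refine ⟨?_, ?_⟩
      · intro h; simp [List.findIdx?_cons] at h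
      · intro k hk
        simp [List.findIdx?_cons] at hk
        subst hk
        simp [List.takeWhile_cons, List.dropWhile_cons]
    · have ha' : (a == c) = false := by simp [ha]
      refine ⟨?_, ?_⟩
      · intro h
        simp [List.findIdx?_cons, ha'] at h
        have h' : List.findIdx? (fun x => x == c) l = none := by simpa using h
        rw [List.dropWhile_cons, if_pos (by simp [ha]), ih.1 h']
      · intro k hk
        simp [List.findIdx?_cons, ha'] at hk
        obtain ⟨k', hk', rfl⟩ := hk
        obtain ⟨h1, h2⟩ := ih.2 k' hk'
        refine ⟨?_, ?_⟩
        · rw [List.takeWhile_cons, if_pos (by simp [ha]), h1]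
          rfl
        · rw [List.dropWhile_cons, if_pos (by simp [ha]), h2]
          rfl

theorem take_len_takeWhile (p : Char → Bool) (l : List Char) :
    l.take ((l.takeWhile p).length) = l.takeWhile p := by
  induction l with
  | nil => simp
  | cons a l ih =>
    rw [List.takeWhile_cons]
    by_cases h : p a <;> simp [h, ih]

theorem wordEnd_ge (s : List Char) :
    ∀ (fuel j : Nat), j ≤ wordEnd s fuel j := by
  intro fuel
  induction fuel with
  | zero => intro j; simp [wordEnd]
  | succ f ihf =>
    intro j
    simp only [wordEnd]
    by_cases h1 : j < s.length
    · rw [dif_pos h1]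
      by_cases h2 : isWordChar (s[j]'h1)
      · rw [if_pos h2]
        have := ihf (j + 1); omega
      · rw [if_neg h2]
    · rw [dif_neg h1]

theorem wordEnd_eq (s : List Char) :
    ∀ (fuel j : Nat), s.length - j ≤ fuel →
      wordEnd s fuel j = j + ((s.drop j).takeWhile isWordChar).length := by
  intro fuel
  induction fuel with
  | zero =>
    intro j h
    rw [List.drop_eq_nil_of_le (by omega)]
    simp [wordEnd]
  | succ f ihf =>
    intro j h
    simp only [wordEnd]
    by_cases h1 : j < s.length
    · rw [dif_pos h1, List.drop_eq_getElem_cons h1, List.takeWhile_cons]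
      by_cases h2 : isWordChar (s[j]'h1)
      · rw [if_pos h2, ihf (j + 1) (by omega)]
        simp [h2]
        omega
      · rw [if_neg h2]
        simp [h2]
    · rw [dif_neg h1, List.drop_eq_nil_of_le (by omega)]
      simp

theorem loopA_flatten (s : List Char) (envd : List (String × String)) :
    ∀ (n i : Nat) (out : List (List Char)), s.length - i ≤ n →
      (loopA s envd n i out).flatten
        = out.flatten ++ expandB envd ((s.drop i).length + 1) (s.drop i) := by
  intro n
  induction n with
  | zero =>
    intro i out h
    rw [List.drop_eq_nil_of_le (by omega)]
    simp [loopA, expandB_nil]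
  | succ n ih =>
    intro i out h
    by_cases hi : i < s.length
    case neg =>
      simp only [loopA]
      rw [dif_neg hi, List.drop_eq_nil_of_le (by omega), expandB_nil]
      simp
    case pos =>
      simp only [loopA]
      rw [dif_pos hi]
      have hdrop : s.drop i = (s[i]'hi) :: s.drop (i + 1) := List.drop_eq_getElem_cons hi
      by_cases hch : (s[i]'hi) = '$'
      case neg =>
        rw [if_pos hch, ih (i + 1) (out ++ [[s[i]'hi]]) (by omega), hdrop]
        simp only [List.length_cons]
        rw [expandB_cons_ne _ _ _ _ hch,
          expandB_congr envd ((s.drop (i + 1)).length + 1 + 1) (s.drop (i + 1))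
            ((s.drop (i + 1)).length + 1) (by omega) (by omega)]
        simp
      case pos =>
        rw [if_neg (by simp [hch]), hdrop, hch]
        simp only [List.length_cons]
        rw [expandB_dollar]
        have hhead : (s.drop (i + 1)).head? = s[i + 1]? := List.head?_drop ..
        have htail : (s.drop (i + 1)).tail = s.drop (i + 2) := by
          rw [List.tail_drop]
        rw [hhead, htail]
        by_cases hb : s[i + 1]? = some '{'
        · rw [if_pos hb, if_pos hb]
          cases hbe : braceEnd s (i + 2) with
          | none =>
            try simp only [hbe]
            have hf : (s.drop (i + 2)).findIdx? (· == '}') = none := by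
              simpa [braceEnd] using hbe
            have hd := (find_spec '}' (s.drop (i + 2))).1 hf
            rw [if_neg (by rw [hd]; simp), ih (i + 1) (out ++ [['$']]) (by omega)]
            simp
          | some e =>
            try simp only [hbe]
            obtain ⟨k, hk, he⟩ :
                ∃ k, (s.drop (i + 2)).findIdx? (· == '}') = some k ∧ e = i + 2 + k := by
              simp only [braceEnd, Option.map_eq_some_iff] at hbe
              obtain ⟨k, hk1, hk2⟩ := hbe
              exact ⟨k, hk1, hk2.symm⟩
            obtain ⟨htw, hdw⟩ := (find_spec '}' (s.drop (i + 2))).2 k hk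
            rw [if_pos (by rw [hdw]; simp), ih (e + 1) _ (by omega), htw, hdw]
            have h1 : (s.drop (i + 2)).drop (k + 1) = s.drop (e + 1) := by
              rw [List.drop_drop]
              congr 1
              omega
            have h2 : e - (i + 2) = k := by omega
            have l1 : (s.drop (i + 1)).length = s.length - (i + 1) := List.length_drop ..
            have l2 : (s.drop (e + 1)).length = s.length - (e + 1) := List.length_drop ..
            have hcg := expandB_congr envd ((s.drop (i + 1)).length + 1) (s.drop (e + 1))
              ((s.drop (e + 1)).length + 1) (by omega) (by omega)
            simp only [List.tail_cons, h1, h2, hcg]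
            simp
        · rw [if_neg hb, if_neg hb]
          have hwe := wordEnd_eq s s.length (i + 1) (by omega)
          have hname : (s.drop (i + 1)).take (wordEnd s s.length (i + 1) - (i + 1)) =
              (s.drop (i + 1)).takeWhile isWordChar := by
            rw [hwe, Nat.add_sub_cancel_left, take_len_takeWhile]
          rw [hname]
          by_cases hn : (s.drop (i + 1)).takeWhile isWordChar = []
          · rw [if_pos hn, if_pos hn, ih (i + 1) (out ++ [['$']]) (by omega)]
            simp
          · rw [if_neg hn, if_neg hn]
            have hwg := wordEnd_ge s s.length (i + 1)
            rw [ih (wordEnd s s.length (i + 1)) _ (by omega)]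
            have hj : s.drop (wordEnd s s.length (i + 1)) =
                (s.drop (i + 1)).drop (((s.drop (i + 1)).takeWhile isWordChar).length) := by
              rw [List.drop_drop, hwe]
            rw [hj]
            have hlt : ((s.drop (i + 1)).drop
                (((s.drop (i + 1)).takeWhile isWordChar).length)).length
                ≤ (s.drop (i + 1)).length := by
              simp only [List.length_drop]
              omega
            have hcg := expandB_congr envd ((s.drop (i + 1)).length + 1)
              ((s.drop (i + 1)).drop (((s.drop (i + 1)).takeWhile isWordChar).length))
              (((s.drop (i + 1)).drop
                (((s.drop (i + 1)).takeWhile isWordChar).length)).length + 1)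
              (by omega) (by omega)
            rw [hcg]
            simp

-- ===== VERDICT (by name: the statement is the Claim_ definition above) =====
theorem expand_env_value_py_spec : Claim_equal_expand_env_value_py := by
  unfold Claim_equal_expand_env_value_py
  intro value host_env _hd
  unfold Spec_expand_env_value_py expand_env_value_py expand_env_value_py_alt
  by_cases hc : value.toList.contains '$' = false
  · rw [if_pos hc, if_pos hc]
  · rw [if_neg hc, if_neg hc]
    have h := loopA_flatten value.toList host_env (value.toList.length + 1) 0 [] (by omega)
    simp only [List.drop_zero, List.flatten_nil, List.nil_append] at h
    rw [h]
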